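-- pv_equiv track=rewrite | github.com/Antonio-III/Python | OC/Problems/Math/_04_algebra1.py | __rewrite_db_neg_to_pos
-- ===== SOURCE A (Python) =====
-- def __rewrite_db_neg_to_pos(exp: str) -> str:
--     """Rewrites subtraction of a negative number as an addition of a positive number.
--
--     Args:
--         exp: The mathematical expression.
--
--     Returns:
--         The mathematical expression but all instances of double negatives are replaced with addition of a positive number.
--     """
--     exp_l = len(exp)
--
--     new = ""
--
--     i = 0
--
--     while i < exp_l:
--         curr = exp[i]
--
--         if (i > 0) and (i+3 < exp_l):
--             if (curr == "-" and exp[i+1: i+3] == "(-") and exp[i-1].isalnum():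
--
--                 new += f"+{exp[i+3]}"
--                 i += 4
--                 continue
--
--
--         new += curr
--
--         i += 1
--     return new
-- ===== SOURCE B (Python) =====
-- def __rewrite_db_neg_to_pos(exp: str) -> str:
--     """Rewrites subtraction of a negative number as an addition of a positive number.
--
--     Find-based rewrite: jump from one '-(-' occurrence to the next with str.find
--     and copy whole slices between them, instead of walking char by char.
--     """
--     n = len(exp)
--     parts = []
--     i = 0
--     while True:
--         j = exp.find("-(-", i)
--         if j == -1:
--             parts.append(exp[i:])
--             break
--         if j > 0 and j + 3 < n and exp[j - 1].isalnum():
--             parts.append(exp[i:j])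
--             parts.append("+" + exp[j + 3])
--             i = j + 4
--         else:
--             parts.append(exp[i:j + 1])
--             i = j + 1
--     return "".join(parts)
-- ===== Notes on version B (the rewrite author's own statement) =====
-- stated objective: faster
-- what changed: Replaces the char-by-char index walk with a find-based scan that jumps straight to the next '-(-' occurrence and copies whole slices between occurrences, joining the collected segments at the end.
import Mathlib
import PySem

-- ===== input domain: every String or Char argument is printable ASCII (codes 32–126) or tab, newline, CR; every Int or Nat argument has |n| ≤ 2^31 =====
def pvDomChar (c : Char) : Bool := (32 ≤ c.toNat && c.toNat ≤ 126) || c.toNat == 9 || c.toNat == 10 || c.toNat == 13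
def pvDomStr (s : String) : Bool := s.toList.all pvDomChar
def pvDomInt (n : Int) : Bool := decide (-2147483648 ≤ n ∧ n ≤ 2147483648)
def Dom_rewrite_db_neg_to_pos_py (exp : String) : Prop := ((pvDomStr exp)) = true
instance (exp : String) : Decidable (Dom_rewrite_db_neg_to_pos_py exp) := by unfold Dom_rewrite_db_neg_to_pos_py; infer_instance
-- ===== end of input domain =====

-- B replaces A's char-by-char index walk with a find-based scan that copies whole slices between '-(-' occurrences.

-- ===== PORT A =====
-- the while loop of A; exp[k] is written cs.getD k ' ' (every index A reads is in
-- range by the loop guards, so this equals Python's exp[k] exactly); the slice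
-- comparison exp[i+1:i+3] == "(-" is a PySem slice compared with ['(', '-'].
-- The Nat fuel only makes the recursion structural: each iteration increases i,
-- so the initial fuel n + 1 is never exhausted.
def aLoop (cs : List Char) (n : Nat) : Nat → Nat → List Char → List Char
  | 0, _, new => new
  | fuel + 1, i, new =>
    if i < n then
      if i > 0 && i + 3 < n then
        if (cs.getD i ' ' == '-'
              && PySem.List.slice cs (some ((i : Int) + 1)) (some ((i : Int) + 3)) == ['(', '-'])
            && PySem.Chars.isalnum (cs.getD (i - 1) ' ') then
          aLoop cs n fuel (i + 4) (new ++ ['+', cs.getD (i + 3) ' '])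
        else
          aLoop cs n fuel (i + 1) (new ++ [cs.getD i ' '])
      else
        aLoop cs n fuel (i + 1) (new ++ [cs.getD i ' '])
    else new

def rewrite_db_neg_to_pos_py (exp : String) : String :=
  String.ofList (aLoop exp.toList exp.toList.length (exp.toList.length + 1) 0 [])

-- ===== PORT B =====
-- hand port of Source B's exp.find("-(-", i) for a Nat start i: first j ≥ i at which
-- the 3-char pattern matches (none = Python's -1); exact for every 0 ≤ i,
-- including i past the length (no match there, as in CPython). Fuel cs.length + 1
-- only makes the scan structural; it covers every start position.
def findDbNeg (cs : List Char) : Nat → Nat → Option Nat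
  | 0, _ => none
  | fuel + 1, i =>
    if i + 3 ≤ cs.length then
      if cs.getD i ' ' == '-' && cs.getD (i + 1) ' ' == '(' && cs.getD (i + 2) ' ' == '-' then
        some i
      else findDbNeg cs fuel (i + 1)
    else none

-- the while loop of Source B: the slices exp[i:], exp[i:j], exp[i:j+1] are PySem slices;
-- the fuel again only makes the loop structural (i strictly increases and any found
-- j satisfies j + 3 < length, so fuel n + 1 is never exhausted)
def bLoop (cs : List Char) (n : Nat) : Nat → Nat → List Char → List Char
  | 0, _, acc => acc
  | fuel + 1, i, acc =>
    match findDbNeg cs (cs.length + 1) i with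
    | none => acc ++ PySem.List.slice cs (some (i : Int)) none
    | some j =>
      if j > 0 && j + 3 < n && PySem.Chars.isalnum (cs.getD (j - 1) ' ') then
        bLoop cs n fuel (j + 4) (acc ++ PySem.List.slice cs (some (i : Int)) (some (j : Int))
          ++ ['+', cs.getD (j + 3) ' '])
      else
        bLoop cs n fuel (j + 1) (acc ++ PySem.List.slice cs (some (i : Int)) (some ((j : Int) + 1)))

def rewrite_db_neg_to_pos_py_alt (exp : String) : String :=
  String.ofList (bLoop exp.toList exp.toList.length (exp.toList.length + 1) 0 [])

-- ===== PRECONDITION & SPEC =====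
def Spec_rewrite_db_neg_to_pos_py (exp : String) (out : String) : Prop := out = rewrite_db_neg_to_pos_py_alt exp
instance (exp : String) (out : String) : Decidable (Spec_rewrite_db_neg_to_pos_py exp out) := by unfold Spec_rewrite_db_neg_to_pos_py; infer_instance

-- ===== CLAIM (what is proved, stated in full; the proofs are below) =====
def Claim_equal_rewrite_db_neg_to_pos_py : Prop := ∀ (exp : String), Dom_rewrite_db_neg_to_pos_py exp → Spec_rewrite_db_neg_to_pos_py exp (rewrite_db_neg_to_pos_py exp)

-- ===== LEMMAS AND PROOFS =====

-- "the pattern '-(-' matches at position k"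
def MatchAt (cs : List Char) (k : Nat) : Prop :=
  cs.getD k ' ' = '-' ∧ cs.getD (k + 1) ' ' = '(' ∧ cs.getD (k + 2) ' ' = '-'

-- A's full rewrite condition at position k
def ACond (cs : List Char) (n k : Nat) : Prop :=
  0 < k ∧ k + 3 < n ∧ MatchAt cs k ∧ PySem.Chars.isalnum (cs.getD (k - 1) ' ') = true

theorem findDbNeg_none {cs : List Char} :
    ∀ fuel i, cs.length + 1 ≤ fuel + i → findDbNeg cs fuel i = none →
      ∀ k, i ≤ k → ¬ (k + 3 ≤ cs.length ∧ MatchAt cs k) := by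
  intro fuel
  induction fuel with
  | zero => intro i hfu _ k hk hbad; omega
  | succ fuel ih =>
    intro i hfu hfind k hk hbad
    simp only [findDbNeg] at hfind
    by_cases h3 : i + 3 ≤ cs.length
    · rw [if_pos h3] at hfind
      by_cases hm : (cs.getD i ' ' == '-' && cs.getD (i + 1) ' ' == '('
          && cs.getD (i + 2) ' ' == '-') = true
      · rw [if_pos hm] at hfind; simp at hfind
      · rw [if_neg hm] at hfind
        rcases Nat.eq_or_lt_of_le hk with rfl | hlt
        · obtain ⟨-, m1, m2, m3⟩ := hbad
          simp only [List.getD_eq_getElem?_getD] at m1 m2 m3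
          simp [m1, m2, m3] at hm
        · exact ih (i + 1) (by omega) hfind k hlt hbad
    · obtain ⟨hb, -⟩ := hbad
      omega

theorem findDbNeg_some {cs : List Char} :
    ∀ fuel i j, findDbNeg cs fuel i = some j →
      i ≤ j ∧ j + 3 ≤ cs.length ∧ MatchAt cs j ∧
        ∀ k, i ≤ k → k < j → ¬ (k + 3 ≤ cs.length ∧ MatchAt cs k) := by
  intro fuel
  induction fuel with
  | zero => intro i j h; simp [findDbNeg] at h
  | succ fuel ih =>
    intro i j h
    simp only [findDbNeg] at h
    by_cases h3 : i + 3 ≤ cs.length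
    · rw [if_pos h3] at h
      by_cases hm : (cs.getD i ' ' == '-' && cs.getD (i + 1) ' ' == '('
          && cs.getD (i + 2) ' ' == '-') = true
      · rw [if_pos hm] at h
        injection h with h; subst h
        simp at hm
        refine ⟨le_refl _, h3, ?_, by omega⟩
        simp only [MatchAt, List.getD_eq_getElem?_getD]
        tauto
      · rw [if_neg hm] at h
        obtain ⟨ha, hb, hc, hd⟩ := ih (i + 1) j h
        refine ⟨by omega, hb, hc, ?_⟩
        intro k hk hkj hbad
        rcases Nat.eq_or_lt_of_le hk with rfl | hlt
        · obtain ⟨-, m1, m2, m3⟩ := hbad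
          simp only [List.getD_eq_getElem?_getD] at m1 m2 m3
          simp [m1, m2, m3] at hm
        · exact hd k hlt hkj hbad
    · rw [if_neg h3] at h; simp at h

-- the slice exp[i+1:i+3] is the two-element list of chars, given i+3 ≤ length
theorem slice_pair_eq {cs : List Char} {i : Nat} (h : i + 3 ≤ cs.length) :
    PySem.List.slice cs (some ((i : Int) + 1)) (some ((i : Int) + 3)) =
      [cs.getD (i + 1) ' ', cs.getD (i + 2) ' '] := by
  have h1 : ((i : Int) + 1) = ((i + 1 : Nat) : Int) := by push_cast; ring
  have h2 : ((i : Int) + 3) = ((i + 3 : Nat) : Int) := by push_cast; ring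
  have e1 : i + 1 < cs.length := by omega
  have e2 : i + 2 < cs.length := by omega
  rw [h1, h2, PySem.List.slice_natCast]
  have h3 : i + 3 - (i + 1) = 2 := by omega
  have hdrop : cs.drop (i + 1) = cs[i + 1] :: cs.drop (i + 2) := by
    rw [List.drop_eq_getElem_cons e1]
  have hdrop2 : cs.drop (i + 2) = cs[i + 2] :: cs.drop (i + 3) := by
    rw [List.drop_eq_getElem_cons e2]
  rw [h3, hdrop, hdrop2]
  rw [List.take_succ_cons, List.take_succ_cons, List.take_zero]
  simp only [List.getD_eq_getElem?_getD, List.getElem?_eq_getElem e1,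
    List.getElem?_eq_getElem e2, Option.getD_some]

-- one copy step of A's loop
theorem aLoop_step_copy {cs : List Char} {n i : Nat} (hn : n = cs.length) (hi : i < n)
    (hfail : ¬ ACond cs n i) (fuel : Nat) (new : List Char) :
    aLoop cs n (fuel + 1) i new = aLoop cs n fuel (i + 1) (new ++ [cs.getD i ' ']) := by
  simp only [aLoop]
  rw [if_pos hi]
  by_cases hg : (decide (i > 0) && decide (i + 3 < n)) = true
  · rw [if_pos hg]
    have h3 : i + 3 ≤ cs.length := by simp at hg; omega
    rw [slice_pair_eq h3]
    rw [if_neg ?_]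
    intro hc
    simp at hc hg
    apply hfail
    simp only [ACond, MatchAt, List.getD_eq_getElem?_getD]
    refine ⟨hg.1, hg.2, ?_, ?_⟩ <;> tauto
  · rw [if_neg hg]

-- one rewrite step of A's loop
theorem aLoop_step_rewrite {cs : List Char} {n i : Nat} (hn : n = cs.length) (hi : i < n)
    (hok : ACond cs n i) (fuel : Nat) (new : List Char) :
    aLoop cs n (fuel + 1) i new = aLoop cs n fuel (i + 4) (new ++ ['+', cs.getD (i + 3) ' ']) := by
  obtain ⟨h0, h3, ⟨m1, m2, m3⟩, hal⟩ := hok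
  simp only [List.getD_eq_getElem?_getD] at m1 m2 m3 hal
  simp only [aLoop]
  rw [if_pos hi, if_pos (by simp [h0, h3])]
  rw [slice_pair_eq (by omega)]
  rw [if_pos (by simp [m1, m2, m3, hal])]

-- loop exit: once i ≥ n the loop returns, whatever fuel is left
theorem aLoop_end {cs : List Char} {n i : Nat} (hi : ¬ i < n) (fuel : Nat) (new : List Char) :
    aLoop cs n fuel i new = new := by
  cases fuel with
  | zero => rfl
  | succ fuel => simp only [aLoop]; rw [if_neg hi]

-- the result does not depend on the fuel, as long as it covers the remaining positions
theorem aLoop_congr {cs : List Char} {n : Nat} (hn : n = cs.length) :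
    ∀ fuel fuel' i new, n ≤ fuel + i → n ≤ fuel' + i →
      aLoop cs n fuel i new = aLoop cs n fuel' i new := by
  intro fuel
  induction fuel with
  | zero =>
    intro fuel' i new h h'
    rw [aLoop_end (by omega), aLoop_end (by omega)]
  | succ fuel ih =>
    intro fuel' i new h h'
    by_cases hi : i < n
    · cases fuel' with
      | zero => omega
      | succ fuel' =>
        by_cases hA : ACond cs n i
        · rw [aLoop_step_rewrite hn hi hA, aLoop_step_rewrite hn hi hA]
          exact ih fuel' (i + 4) _ (by omega) (by omega)
        · rw [aLoop_step_copy hn hi hA, aLoop_step_copy hn hi hA]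
          exact ih fuel' (i + 1) _ (by omega) (by omega)
    · rw [aLoop_end hi, aLoop_end hi]

-- if no position in [i, i+d) carries a pattern match, A's loop walks d chars copying the slice
theorem aLoop_copy_to {cs : List Char} {n : Nat} (hn : n = cs.length) :
    ∀ d i new fuel, i + d ≤ cs.length →
      (∀ k, i ≤ k → k < i + d → ¬ (k + 3 ≤ cs.length ∧ MatchAt cs k)) →
      aLoop cs n (fuel + d) i new = aLoop cs n fuel (i + d) (new ++ (cs.drop i).take d) := by
  intro d
  induction d with
  | zero => intro i new fuel _ _; simp
  | succ d ih =>
    intro i new fuel hlen hno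
    have hi' : i < cs.length := by omega
    have hfail : ¬ ACond cs n i := by
      intro hA
      obtain ⟨h0, h3, hM, hal⟩ := hA
      exact hno i (le_refl _) (by omega) ⟨by omega, hM⟩
    rw [Nat.add_succ]
    rw [aLoop_step_copy hn (by omega) hfail]
    rw [ih (i + 1) _ fuel (by omega) (fun k hk hkj => hno k (by omega) (by omega))]
    have hidx : i + 1 + d = i + (d + 1) := by omega
    rw [hidx]
    congr 1
    rw [List.append_assoc]
    congr 1
    rw [List.drop_eq_getElem_cons hi', List.take_succ_cons]
    simp [List.getD_eq_getElem?_getD, hi']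

-- if no position in [i, ∞) carries a match, A's loop copies the rest verbatim
theorem aLoop_copy_all {cs : List Char} {n : Nat} (hn : n = cs.length) :
    ∀ fuel i new, n ≤ fuel + i →
      (∀ k, i ≤ k → ¬ (k + 3 ≤ cs.length ∧ MatchAt cs k)) →
      aLoop cs n fuel i new = new ++ cs.drop i := by
  intro fuel i new hfu hno
  by_cases h : i ≤ cs.length
  · rw [aLoop_congr hn fuel (1 + (cs.length - i)) i new hfu (by omega)]
    rw [aLoop_copy_to hn (cs.length - i) i new 1 (by omega) (fun k hk _ => hno k hk)]
    rw [aLoop_end (by omega)]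
    congr 1
    exact List.take_of_length_le (by simp)
  · rw [aLoop_end (by omega), List.drop_of_length_le (by omega)]
    simp

-- the copied slice grows by exactly the one char A copies
theorem take_snoc {cs : List Char} {i j : Nat} (hij : i ≤ j) (hj : j < cs.length) :
    (cs.drop i).take (j + 1 - i) = (cs.drop i).take (j - i) ++ [cs.getD j ' '] := by
  have h1 : j + 1 - i = (j - i) + 1 := by omega
  rw [h1, List.take_succ, List.getElem?_drop]
  have h2 : i + (j - i) = j := by omega
  rw [h2, List.getElem?_eq_getElem hj]
  simp [List.getD_eq_getElem?_getD, List.getElem?_eq_getElem, hj]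

-- main loop equivalence
theorem loop_eq {cs : List Char} {n : Nat} (hn : n = cs.length) :
    ∀ fuelB i acc, cs.length + 1 ≤ fuelB + i →
      ∀ fuelA, n ≤ fuelA + i → aLoop cs n fuelA i acc = bLoop cs n fuelB i acc := by
  intro fuelB
  induction fuelB with
  | zero =>
    intro i acc hB fuelA hA
    rw [aLoop_end (by omega)]
    rfl
  | succ fuelB ih =>
    intro i acc hB fuelA hA
    cases hfind : findDbNeg cs (cs.length + 1) i with
    | none =>
      have hno := findDbNeg_none (cs.length + 1) i (by omega) hfind
      rw [aLoop_copy_all hn fuelA i acc hA hno]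
      simp only [bLoop, hfind]
      rw [PySem.List.slice_from cs (Int.natCast_nonneg i), Int.toNat_natCast]
    | some j =>
      obtain ⟨hij, hj3, hM, hno⟩ := findDbNeg_some (cs.length + 1) i j hfind
      simp only [bLoop, hfind]
      rw [aLoop_congr hn fuelA ((n + 1) + (j - i)) i acc hA (by omega)]
      rw [aLoop_copy_to hn (j - i) i acc (n + 1) (by omega)
        (fun k hk hkj => hno k hk (by omega))]
      have hj' : i + (j - i) = j := by omega
      rw [hj']
      by_cases hguard : (decide (j > 0) && decide (j + 3 < n)
          && PySem.Chars.isalnum (cs.getD (j - 1) ' ')) = true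
      · rw [if_pos hguard]
        simp at hguard
        have hok : ACond cs n j := by
          refine ⟨hguard.1.1, hguard.1.2, hM, ?_⟩
          simp only [List.getD_eq_getElem?_getD]
          exact hguard.2
        rw [aLoop_step_rewrite hn (by omega) hok, PySem.List.slice_natCast]
        exact ih (j + 4) _ (by omega) n (by omega)
      · rw [if_neg hguard]
        have hfail : ¬ ACond cs n j := by
          intro hA'
          obtain ⟨h0, h3, -, hal⟩ := hA'
          simp only [List.getD_eq_getElem?_getD] at hal
          exact hguard (by simp [h0, h3, hal])
        rw [aLoop_step_copy hn (by omega) hfail]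
        have hc : ((j : Int) + 1) = ((j + 1 : Nat) : Int) := by push_cast; ring
        rw [hc, PySem.List.slice_natCast, take_snoc hij (by omega)]
        rw [ih (j + 1) _ (by omega) n (by omega)]
        rw [List.append_assoc]

-- ===== VERDICT (by name: the statement is the Claim_ definition above) =====
theorem rewrite_db_neg_to_pos_py_spec : Claim_equal_rewrite_db_neg_to_pos_py := by
  intro exp _
  unfold Spec_rewrite_db_neg_to_pos_py rewrite_db_neg_to_pos_py rewrite_db_neg_to_pos_py_alt
  congr 1
  exact loop_eq rfl (exp.toList.length + 1) 0 [] (by omega) (exp.toList.length + 1) (by omega)
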